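-- pv_equiv track=rewrite | github.com/silviu26/Python | lab3/tema2.py | ex9
-- ===== SOURCE A (Python) =====
-- def ex9(matrix):
--     rezultat=[]
--     for j in range(len(matrix[0])):
--         max=matrix[0][j]
--         for i in range(1,len(matrix)):
--             if matrix[i][j]<=max:
--                 rezultat.append((i,j))
--             else:
--                 max=matrix[i][j]
--     return rezultat
-- ===== SOURCE B (Python) =====
-- def ex9(matrix):
--     rezultat = []
--     for j in range(len(matrix[0])):
--         col = [row[j] for row in matrix]
--         pm = []
--         m = col[0]
--         for v in col:
--             m = v if v > m else m
--             pm.append(m)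
--         for i, (v, p) in enumerate(zip(col[1:], pm), 1):
--             if v <= p:
--                 rezultat.append((i, j))
--     return rezultat
-- ===== Notes on version B (the rewrite author's own statement) =====
-- stated objective: alternative
-- what changed: Replaces A's single interleaved scan carrying a mutable running max with a two-phase per-column pipeline: extract the column, build its full prefix-maximum list, then zip the column's tail against the shifted prefix maxima and collect indices where the entry does not exceed the previous prefix max.
import Mathlib
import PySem

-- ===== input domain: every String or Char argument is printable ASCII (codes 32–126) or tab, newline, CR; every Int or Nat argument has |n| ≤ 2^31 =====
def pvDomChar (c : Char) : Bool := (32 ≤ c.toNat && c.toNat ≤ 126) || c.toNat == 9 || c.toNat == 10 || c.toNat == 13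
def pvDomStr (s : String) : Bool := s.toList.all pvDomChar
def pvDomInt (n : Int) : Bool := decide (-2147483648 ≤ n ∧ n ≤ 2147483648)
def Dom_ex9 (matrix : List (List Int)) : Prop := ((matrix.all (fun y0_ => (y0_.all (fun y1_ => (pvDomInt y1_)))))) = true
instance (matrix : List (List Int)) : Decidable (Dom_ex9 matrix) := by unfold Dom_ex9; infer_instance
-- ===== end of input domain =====

-- B replaces A's interleaved scan (running max mutated while collecting) by a two-phase
-- per-column pipeline: build the column's prefix-maximum list, then zip the column tail
-- with the shifted prefix maxima and collect; same cost, alternative decomposition.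

-- ===== PORT A =====
def ex9 (matrix : List (List Int)) : List (Int × Int) :=
  let row0 := (PySem.List.pyGet? matrix 0).getD []
  (PySem.List.pyRange 0 (row0.length : Int) 1).foldl (fun rezultat j =>
    ((PySem.List.pyRange 1 (matrix.length : Int) 1).foldl
      (fun (st : Int × List (Int × Int)) i =>
        if PySem.List.pyGetD (PySem.List.pyGetD matrix i []) j 0 ≤ st.1 then
          (st.1, st.2 ++ [(i, j)])
        else
          (PySem.List.pyGetD (PySem.List.pyGetD matrix i []) j 0, st.2))
      (PySem.List.pyGetD row0 j 0, rezultat)).2) []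

-- ===== PORT B =====
def ex9_alt (matrix : List (List Int)) : List (Int × Int) :=
  let row0 := (PySem.List.pyGet? matrix 0).getD []
  (PySem.List.pyRange 0 (row0.length : Int) 1).foldl (fun rezultat j =>
    let col := matrix.map (fun row => PySem.List.pyGetD row j 0)
    let pm := (col.foldl (fun (st : Int × List Int) v =>
        ((if v > st.1 then v else st.1), st.2 ++ [if v > st.1 then v else st.1]))
        (PySem.List.pyGetD col 0 0, [])).2
    (PySem.List.enumerate ((PySem.List.slice col (some 1) none).zip pm) 1).foldl
      (fun rez p => if p.2.1 ≤ p.2.2 then rez ++ [(p.1, j)] else rez) rezultat) []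

-- ===== PRECONDITION & SPEC =====
-- Pre_ excludes exactly the inputs where the Python A raises IndexError: the empty matrix
-- (matrix[0]) and ragged matrices with a row shorter than the first row (matrix[i][j]).
def Pre_ex9 (matrix : List (List Int)) : Prop :=
  matrix ≠ [] ∧ ∀ row ∈ matrix, (matrix.headD []).length ≤ row.length
instance (matrix : List (List Int)) : Decidable (Pre_ex9 matrix) := by unfold Pre_ex9; infer_instance

def pvWitness_ex9 : List (List Int) := [[1, 2], [3, 0]]

def Spec_ex9 (matrix : List (List Int)) (out : List (Int × Int)) : Prop := out = ex9_alt matrix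
instance (matrix : List (List Int)) (out : List (Int × Int)) : Decidable (Spec_ex9 matrix out) := by unfold Spec_ex9; infer_instance

-- ===== CLAIM (what is proved, stated in full; the proofs are below) =====
def Claim_equal_ex9 : Prop := ∀ (matrix : List (List Int)), Dom_ex9 matrix → Pre_ex9 matrix → Spec_ex9 matrix (ex9 matrix)

-- ===== LEMMAS AND PROOFS =====

-- the common per-column result: indices (i, j) of tail entries not exceeding the running max
def pvPicks (j : Int) : Int → Int → List Int → List (Int × Int)
  | _, _, [] => []
  | m, i, v :: r => (if v ≤ m then [(i, j)] else []) ++ pvPicks j (if v > m then v else m) (i + 1) r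

-- prefix maxima of a column, seeded with m
def pvPM : Int → List Int → List Int
  | _, [] => []
  | m, v :: r => (if v > m then v else m) :: pvPM (if v > m then v else m) r

-- an index loop over range(k, len xs) reading xs[i] is a fold over enumerate(xs.drop k, k)
theorem pv_foldl_pyRange_enum {β : Type} (xs : List Int) (f : β → Int → Int → β) (k : Nat)
    (init : β) :
    (PySem.List.pyRange (k : Int) (xs.length : Int) 1).foldl
        (fun acc i => f acc i (PySem.List.pyGetD xs i 0)) init
      = (PySem.List.enumerate (xs.drop k) (k : Int)).foldl (fun acc p => f acc p.1 p.2) init := by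
  by_cases h : k < xs.length
  · rw [PySem.List.pyRange_one_cons (by exact_mod_cast h),
        List.drop_eq_getElem_cons h, PySem.List.enumerate_cons]
    simp only [List.foldl_cons]
    have hg : PySem.List.pyGetD xs (k : Int) 0 = xs[k] := by
      rw [PySem.List.pyGetD_natCast]; exact List.getD_eq_getElem xs 0 h
    rw [hg]
    have := pv_foldl_pyRange_enum xs f (k + 1) (f init (k : Int) xs[k])
    simpa [Nat.cast_add] using this
  · rw [PySem.List.pyRange_one_eq_nil (by exact_mod_cast Nat.le_of_not_lt h),
        List.drop_eq_nil_of_le (Nat.le_of_not_lt h)]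
    simp [PySem.List.enumerate]
termination_by xs.length - k

-- A's inner loop computes pvPicks
theorem pv_foldA (j : Int) (c : List Int) : ∀ (m i : Int) (acc : List (Int × Int)),
    ((PySem.List.enumerate c i).foldl
        (fun (st : Int × List (Int × Int)) p =>
          if p.2 ≤ st.1 then (st.1, st.2 ++ [(p.1, j)]) else (p.2, st.2)) (m, acc)).2
      = acc ++ pvPicks j m i c := by
  induction c with
  | nil => intro m i acc; simp [pvPicks]
  | cons v r ih =>
    intro m i acc
    rw [PySem.List.enumerate_cons]
    simp only [List.foldl_cons]
    by_cases h : v ≤ m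
    · have hgt : ¬ v > m := not_lt.mpr h
      simp [h, hgt, pvPicks, ih]
    · have hgt : v > m := not_le.mp h
      simp [h, hgt, pvPicks, ih]

-- B's prefix-max loop computes pvPM
theorem pv_foldPM (c : List Int) : ∀ (m : Int) (out : List Int),
    (c.foldl (fun (st : Int × List Int) v =>
        ((if v > st.1 then v else st.1), st.2 ++ [if v > st.1 then v else st.1])) (m, out)).2
      = out ++ pvPM m c := by
  induction c with
  | nil => intro m out; simp [pvPM]
  | cons v r ih => intro m out; simp [pvPM, ih]

-- B's zip loop computes pvPicks
theorem pv_foldB (j : Int) (c : List Int) : ∀ (m i : Int) (acc : List (Int × Int)),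
    (PySem.List.enumerate (c.zip (m :: pvPM m c)) i).foldl
        (fun rez p => if p.2.1 ≤ p.2.2 then rez ++ [(p.1, j)] else rez) acc
      = acc ++ pvPicks j m i c := by
  induction c with
  | nil => intro m i acc; simp [pvPicks]
  | cons v r ih =>
    intro m i acc
    rw [show (v :: r).zip (m :: pvPM m (v :: r)) = (v, m) :: r.zip (pvPM m (v :: r)) from rfl]
    rw [show pvPM m (v :: r) = (if v > m then v else m) :: pvPM (if v > m then v else m) r from rfl]
    rw [PySem.List.enumerate_cons]
    simp only [List.foldl_cons]
    by_cases h : v ≤ m <;> simp [h, pvPicks, ih]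

-- the two per-column steps agree on every j and accumulator
theorem pv_step_eq (matrix : List (List Int)) (rez : List (Int × Int)) (j : Int) :
    ((PySem.List.pyRange 1 (matrix.length : Int) 1).foldl
      (fun (st : Int × List (Int × Int)) i =>
        if PySem.List.pyGetD (PySem.List.pyGetD matrix i []) j 0 ≤ st.1 then
          (st.1, st.2 ++ [(i, j)])
        else
          (PySem.List.pyGetD (PySem.List.pyGetD matrix i []) j 0, st.2))
      (PySem.List.pyGetD ((PySem.List.pyGet? matrix 0).getD []) j 0, rez)).2
    = (PySem.List.enumerate
        ((PySem.List.slice (matrix.map (fun row => PySem.List.pyGetD row j 0)) (some 1) none).zip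
          (((matrix.map (fun row => PySem.List.pyGetD row j 0)).foldl
            (fun (st : Int × List Int) v =>
              ((if v > st.1 then v else st.1), st.2 ++ [if v > st.1 then v else st.1]))
            (PySem.List.pyGetD (matrix.map (fun row => PySem.List.pyGetD row j 0)) 0 0, [])).2)) 1).foldl
        (fun r p => if p.2.1 ≤ p.2.2 then r ++ [(p.1, j)] else r) rez := by
  cases matrix with
  | nil =>
    simp [PySem.List.pyRange_one_eq_nil (by norm_num : (0:Int) ≤ 1), PySem.List.pyGet?,
          PySem.List.slice]
  | cons r0 rest =>
    have hz : PySem.List.pyGetD ([] : List Int) j 0 = 0 := by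
      simp [PySem.List.pyGetD, PySem.List.pyGet?, PySem.List.pyIdx?]
    have hA :
        (fun (st : Int × List (Int × Int)) (i : Int) =>
          if PySem.List.pyGetD (PySem.List.pyGetD (r0 :: rest) i []) j 0 ≤ st.1 then
            (st.1, st.2 ++ [(i, j)])
          else (PySem.List.pyGetD (PySem.List.pyGetD (r0 :: rest) i []) j 0, st.2))
        = (fun (st : Int × List (Int × Int)) (i : Int) =>
          if PySem.List.pyGetD ((r0 :: rest).map (fun row => PySem.List.pyGetD row j 0)) i 0 ≤ st.1 then
            (st.1, st.2 ++ [(i, j)])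
          else (PySem.List.pyGetD ((r0 :: rest).map (fun row => PySem.List.pyGetD row j 0)) i 0, st.2)) := by
      funext st i
      have hm := PySem.List.pyGetD_map (fun row => PySem.List.pyGetD row j 0) (r0 :: rest) i []
      simp only [hz] at hm
      rw [hm]
    rw [hA]
    have hlen : ((r0 :: rest).length : Int)
        = (((r0 :: rest).map (fun row => PySem.List.pyGetD row j 0)).length : Int) := by simp
    rw [hlen]
    have key := pv_foldl_pyRange_enum ((r0 :: rest).map (fun row => PySem.List.pyGetD row j 0))
      (fun (st : Int × List (Int × Int)) (i v : Int) =>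
        if v ≤ st.1 then (st.1, st.2 ++ [(i, j)]) else (v, st.2)) 1
      (PySem.List.pyGetD ((PySem.List.pyGet? (r0 :: rest) 0).getD []) j 0, rez)
    push_cast at key
    rw [key]
    have hrow0 : (PySem.List.pyGet? (r0 :: rest) 0).getD [] = r0 := by
      simp [PySem.List.pyGet?, PySem.List.pyIdx?]
    rw [hrow0, pv_foldA]
    -- B side
    have hcol : (r0 :: rest).map (fun row => PySem.List.pyGetD row j 0)
        = PySem.List.pyGetD r0 j 0 :: rest.map (fun row => PySem.List.pyGetD row j 0) := by simp
    rw [hcol, PySem.List.pyGetD_zero_cons, pv_foldPM, PySem.List.slice_from_one]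
    have hpm : pvPM (PySem.List.pyGetD r0 j 0)
          (PySem.List.pyGetD r0 j 0 :: rest.map (fun row => PySem.List.pyGetD row j 0))
        = PySem.List.pyGetD r0 j 0 :: pvPM (PySem.List.pyGetD r0 j 0)
            (rest.map (fun row => PySem.List.pyGetD row j 0)) := by
      simp [pvPM]
    rw [List.nil_append, hpm]
    simp only [List.drop_succ_cons, List.drop_zero, List.tail_cons]
    rw [pv_foldB]

-- ===== VERDICT (by name: the statement is the Claim_ definition above) =====
theorem ex9_spec : Claim_equal_ex9 := by
  intro matrix _ _
  unfold Spec_ex9 ex9 ex9_alt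
  simp only []
  apply List.foldl_ext
  intro rez j _
  exact pv_step_eq matrix rez j
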